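-- pv_equiv track=rewrite | github.com/supertrained/rhumb | packages/api/routes/capabilities.py | _recovery_supported_credential_modes
-- ===== SOURCE A (Python) =====
-- def _canonicalize_credential_mode(credential_mode: str | None) -> str | None:
--     normalized = str(credential_mode or "").strip().lower()
--     if not normalized:
--         return None
--     if normalized == "byo":
--         return "byok"
--     return normalized
--
-- def _canonicalize_credential_modes(
--     credential_modes: object,
--     *,
--     default: tuple[str, ...] = ("byok",),
-- ) -> list[str]:
--     raw_modes = credential_modes if isinstance(credential_modes, list) and credential_modes else list(default)
--     normalized_modes: list[str] = []
--     seen: set[str] = set()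
--     for mode in raw_modes:
--         normalized = _canonicalize_credential_mode(str(mode))
--         if normalized and normalized not in seen:
--             normalized_modes.append(normalized)
--             seen.add(normalized)
--     if normalized_modes:
--         return normalized_modes
--     return list(default)
--
-- def _recovery_supported_credential_modes(items: list[dict[str, object]]) -> list[str]:
--     discovered_modes: list[str] = []
--     seen: set[str] = set()
--     for item in items:
--         for mode in _canonicalize_credential_modes(item.get("credential_modes")):
--             if mode in seen:
--                 continue
--             discovered_modes.append(mode)
--             seen.add(mode)
--
--     ordered_modes = [
--         mode
--         for mode in ("rhumb_managed", "agent_vault", "byok")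
--         if mode in seen
--     ]
--     ordered_modes.extend(mode for mode in discovered_modes if mode not in ordered_modes)
--     return ordered_modes
-- ===== SOURCE B (Python) =====
-- def _recovery_supported_credential_modes(items):
--     has_rhumb = has_agent = has_byok = False
--     others = []
--     for item in items:
--         raw = item.get("credential_modes") or ["byok"]
--         canon = [("byok" if c == "byo" else c)
--                  for c in (str(m).strip().lower() for m in raw) if c]
--         if not canon:
--             canon = ["byok"]
--         for mode in canon:
--             if mode == "rhumb_managed":
--                 has_rhumb = True
--             elif mode == "agent_vault":
--                 has_agent = True
--             elif mode == "byok":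
--                 has_byok = True
--             elif mode not in others:
--                 others.append(mode)
--     result = []
--     if has_rhumb:
--         result.append("rhumb_managed")
--     if has_agent:
--         result.append("agent_vault")
--     if has_byok:
--         result.append("byok")
--     return result + others
-- ===== Notes on version B (the rewrite author's own statement) =====
-- stated objective: simpler
-- what changed: B classifies each canonical mode once into three priority presence flags plus an ordered bucket of other modes, replacing A's deduplicated discovered list followed by the priority-filter-then-extend post-passes (and A's per-item dedup loop by a plain comprehension).
import Mathlib
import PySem

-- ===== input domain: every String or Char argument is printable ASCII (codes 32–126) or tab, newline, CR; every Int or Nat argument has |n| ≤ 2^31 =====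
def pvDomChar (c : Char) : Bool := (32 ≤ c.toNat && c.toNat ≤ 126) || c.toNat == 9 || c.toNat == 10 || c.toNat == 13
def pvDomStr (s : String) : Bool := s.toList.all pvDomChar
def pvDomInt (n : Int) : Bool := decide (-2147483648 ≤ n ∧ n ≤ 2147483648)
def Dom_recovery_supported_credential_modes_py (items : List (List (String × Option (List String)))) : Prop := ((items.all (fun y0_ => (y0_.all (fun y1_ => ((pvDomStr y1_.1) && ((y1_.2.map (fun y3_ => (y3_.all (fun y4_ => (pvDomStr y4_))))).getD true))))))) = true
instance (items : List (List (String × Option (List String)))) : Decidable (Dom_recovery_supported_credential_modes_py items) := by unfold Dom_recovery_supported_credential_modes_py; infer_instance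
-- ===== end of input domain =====

-- B replaces A's discovered-list-then-priority-filter-and-extend pipeline by three presence flags
-- plus a bucket of non-priority modes collected in one pass (objective: simpler tail, no post-passes).


-- ===== PORT A =====
-- _canonicalize_credential_mode (argument is always a str here; `credential_mode or ""` is the identity on str)
def pvCanonMode (m : String) : Option String :=
  let normalized := PySem.Str.lower (PySem.Str.strip m)
  if normalized = "" then none
  else if normalized = "byo" then some "byok"
  else some normalized

-- loop body of the dedup loop in _canonicalize_credential_modes
def pvCanonStep (st : List String × PySem.Set String) (mode : String) : List String × PySem.Set String :=
  match pvCanonMode mode with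
  | some n => if PySem.Set.contains st.2 n then st else (st.1 ++ [n], PySem.Set.add st.2 n)
  | none => st

-- loop body of the discovery loop in _recovery_supported_credential_modes
def pvDiscStep (st : List String × PySem.Set String) (mode : String) : List String × PySem.Set String :=
  if PySem.Set.contains st.2 mode then st
  else (st.1 ++ [mode], PySem.Set.add st.2 mode)

-- _canonicalize_credential_modes with the default ("byok",)
def pvCanonModes (cm : Option (List String)) : List String :=
  let raw : List String := match cm with
    | some l => if l.isEmpty then ["byok"] else l
    | none => ["byok"]
  let st := raw.foldl pvCanonStep ([], PySem.Set.empty)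
  if st.1.isEmpty then ["byok"] else st.1

def recovery_supported_credential_modes_py (items : List (List (String × Option (List String)))) : List String :=
  let st := items.foldl (fun (st : List String × PySem.Set String) item =>
      (pvCanonModes ((PySem.Dict.get? (PySem.Dict.mk item) "credential_modes").getD none)).foldl
        pvDiscStep st)
      ([], PySem.Set.empty)
  let ordered := (["rhumb_managed", "agent_vault", "byok"] : List String).filter
      (fun m => PySem.Set.contains st.2 m)
  -- `ordered_modes.extend(mode for mode in discovered_modes if mode not in ordered_modes)`:
  -- the generator tests membership in the list as it grows, hence the fold over the growing list
  st.1.foldl (fun om m => if om.contains m then om else om ++ [m]) ordered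

-- ===== PORT B =====
-- loop body of Source B's classification loop (B-side helper)
def pvAltStep (st : (Bool × Bool × Bool) × List String) (mode : String) : (Bool × Bool × Bool) × List String :=
  if mode = "rhumb_managed" then ((true, st.1.2.1, st.1.2.2), st.2)
  else if mode = "agent_vault" then ((st.1.1, true, st.1.2.2), st.2)
  else if mode = "byok" then ((st.1.1, st.1.2.1, true), st.2)
  else if st.2.contains mode then st
  else (st.1, st.2 ++ [mode])

-- per-item canonical mode list of Source B (strip/lower, drop empties, byo→byok, default ["byok"])
def pvItemModes (cm : Option (List String)) : List String :=
  let raw : List String := match cm with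
    | some l => if l.isEmpty then ["byok"] else l
    | none => ["byok"]
  let canon := ((raw.map (fun m => PySem.Str.lower (PySem.Str.strip m))).filter
      (fun c => c ≠ "")).map (fun c => if c = "byo" then "byok" else c)
  if canon.isEmpty then ["byok"] else canon

def recovery_supported_credential_modes_py_alt (items : List (List (String × Option (List String)))) : List String :=
  let st := items.foldl (fun (st : (Bool × Bool × Bool) × List String) item =>
      (pvItemModes ((PySem.Dict.get? (PySem.Dict.mk item) "credential_modes").getD none)).foldl pvAltStep st)
      ((false, false, false), [])
  (if st.1.1 then ["rhumb_managed"] else []) ++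
  (if st.1.2.1 then ["agent_vault"] else []) ++
  (if st.1.2.2 then ["byok"] else []) ++ st.2

-- ===== PRECONDITION & SPEC =====
def Spec_recovery_supported_credential_modes_py (items : List (List (String × Option (List String)))) (out : List String) : Prop := out = recovery_supported_credential_modes_py_alt items
instance (items : List (List (String × Option (List String)))) (out : List String) : Decidable (Spec_recovery_supported_credential_modes_py items out) := by unfold Spec_recovery_supported_credential_modes_py; infer_instance

-- ===== CLAIM (what is proved, stated in full; the proofs are below) =====
def Claim_equal_recovery_supported_credential_modes_py : Prop := ∀ (items : List (List (String × Option (List String)))), Dom_recovery_supported_credential_modes_py items → Spec_recovery_supported_credential_modes_py items (recovery_supported_credential_modes_py items)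

-- ===== LEMMAS AND PROOFS =====

-- the priority predicate
def pvPrio (m : String) : Bool := m == "rhumb_managed" || m == "agent_vault" || m == "byok"

-- abstraction from A's discovered list to B's state
def pvAbs (d : List String) : (Bool × Bool × Bool) × List String :=
  ((d.contains "rhumb_managed", d.contains "agent_vault", d.contains "byok"),
    d.filter (fun m => !pvPrio m))

-- Source B's canonical stream before the empty-default
def pvStream (raw : List String) : List String :=
  ((raw.map (fun m => PySem.Str.lower (PySem.Str.strip m))).filter
      (fun c => c ≠ "")).map (fun c => if c = "byo" then "byok" else c)

-- elements of l genuinely new w.r.t. seen-set e, in order of first occurrence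
def pvNews (e : List String) : List String → List String
  | [] => []
  | a :: l => if PySem.Set.contains e a then pvNews e l
              else a :: pvNews (e ++ [a]) (l)

theorem pvFoldAdd_eq_append_news (l e : List String) :
    l.foldl PySem.Set.add e = e ++ pvNews e l := by
  induction l generalizing e with
  | nil => simp [pvNews]
  | cons a l ih =>
    simp only [List.foldl_cons, pvNews, PySem.Set.add, PySem.Set.contains]
    by_cases h : a ∈ e
    · simp [h, ih]
    · simp [h, ih, List.append_assoc]

theorem pvFoldAdd_news (l : List String) (e D : List String)
    (h : ∀ x, x ∈ e → x ∈ D) :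
    (pvNews e l).foldl PySem.Set.add D = l.foldl PySem.Set.add D := by
  induction l generalizing e D with
  | nil => simp [pvNews]
  | cons a l ih =>
    simp only [pvNews, PySem.Set.contains, List.foldl_cons]
    by_cases ha : a ∈ e
    · have haD : a ∈ D := h a ha
      have hDa : PySem.Set.add D a = D := by
        simp [PySem.Set.add, PySem.Set.contains, haD]
      simp only [List.contains_iff_mem, ha, if_pos, hDa]
      exact ih e D h
    · simp only [List.contains_iff_mem, ha, if_neg, List.foldl_cons, not_false_iff]
      exact ih (e ++ [a]) (PySem.Set.add D a) (by
        intro x hx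
        rcases List.mem_append.mp hx with hx | hx
        · exact (PySem.Set.mem_add D a x).mpr (Or.inl (h x hx))
        · simp only [List.mem_singleton] at hx
          exact (PySem.Set.mem_add D a x).mpr (Or.inr hx))

-- folding the add-fold result is folding the list itself
theorem pvFoldAdd_ofList (c D : List String) :
    (c.foldl PySem.Set.add ([] : List String)).foldl PySem.Set.add D = c.foldl PySem.Set.add D := by
  have h1 := pvFoldAdd_eq_append_news c []
  simp only [List.nil_append] at h1
  rw [h1]
  exact pvFoldAdd_news c [] D (by simp)

-- helper: A's dedup step from a diagonal state is Set.add on both components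
theorem pvAdd_diag (d : List String) (n : String) :
    (if PySem.Set.contains d n = true then ((d, d) : List String × PySem.Set String)
     else (d ++ [n], PySem.Set.add d n)) = (PySem.Set.add d n, PySem.Set.add d n) := by
  by_cases h : PySem.Set.contains d n = true
  · simp only [PySem.Set.add, PySem.Set.contains, List.contains_iff_mem] at h ⊢
    simp [h]
  · simp only [PySem.Set.add, PySem.Set.contains, List.contains_iff_mem] at h ⊢
    simp [h]

-- A's inner canonicalization loop from a diagonal state is an add-fold over the stream
theorem pvCanonFold_diag (raw : List String) (d : List String) :
    raw.foldl pvCanonStep (d, d)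
    = (pvStream raw |>.foldl PySem.Set.add d, pvStream raw |>.foldl PySem.Set.add d) := by
  induction raw generalizing d with
  | nil => simp [pvStream]
  | cons a raw ih =>
    rw [List.foldl_cons]
    by_cases hs : PySem.Str.lower (PySem.Str.strip a) = ""
    · have h1 : pvCanonStep (d, d) a = (d, d) := by
        simp [pvCanonStep, pvCanonMode, hs]
      have h2 : pvStream (a :: raw) = pvStream raw := by
        simp [pvStream, hs]
      rw [h1, h2, ih d]
    · have h1 : pvCanonStep (d, d) a
          = (PySem.Set.add d (if PySem.Str.lower (PySem.Str.strip a) = "byo" then "byok"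
               else PySem.Str.lower (PySem.Str.strip a)),
             PySem.Set.add d (if PySem.Str.lower (PySem.Str.strip a) = "byo" then "byok"
               else PySem.Str.lower (PySem.Str.strip a))) := by
        by_cases hb : PySem.Str.lower (PySem.Str.strip a) = "byo"
        · simp only [pvCanonStep, pvCanonMode, hs, hb]
          simpa using pvAdd_diag d "byok"
        · simp only [pvCanonStep, pvCanonMode, hs, hb]
          simpa [hs, hb] using pvAdd_diag d (PySem.Str.lower (PySem.Str.strip a))
      have h2 : pvStream (a :: raw)
          = (if PySem.Str.lower (PySem.Str.strip a) = "byo" then "byok"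
              else PySem.Str.lower (PySem.Str.strip a)) :: pvStream raw := by
        simp [pvStream, hs]
      rw [h1, h2, List.foldl_cons, ih]

-- A's discovery loop from a diagonal state is an add-fold
theorem pvDiscFold_diag (l d : List String) :
    l.foldl pvDiscStep (d, d)
    = (l.foldl PySem.Set.add d, l.foldl PySem.Set.add d) := by
  induction l generalizing d with
  | nil => rfl
  | cons a l ih =>
    rw [List.foldl_cons]
    rw [show pvDiscStep (d, d) a = (PySem.Set.add d a, PySem.Set.add d a) from pvAdd_diag d a]
    exact ih (PySem.Set.add d a)

-- an add-fold from the empty set of a nonempty list is nonempty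
theorem pvFoldAdd_ne_nil (c : List String) (hc : c ≠ []) :
    c.foldl PySem.Set.add ([] : List String) ≠ [] := by
  cases c with
  | nil => exact absurd rfl hc
  | cons a c =>
    rw [pvFoldAdd_eq_append_news, List.nil_append]
    simp [pvNews, PySem.Set.contains]

-- pvCanonModes equals the deduplication of pvItemModes, as an add-fold statement
theorem pvCanonModes_eq (cm : Option (List String)) :
    pvCanonModes cm = (pvItemModes cm).foldl PySem.Set.add ([] : List String) := by
  have core : ∀ raw : List String,
      (let st := raw.foldl pvCanonStep ([], PySem.Set.empty)
       if st.1.isEmpty then ["byok"] else st.1)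
      = (let canon := pvStream raw
         if canon.isEmpty then ["byok"] else canon).foldl PySem.Set.add ([] : List String) := by
    intro raw
    rw [show (([], PySem.Set.empty) : List String × PySem.Set String) = ([], []) from rfl]
    rw [pvCanonFold_diag raw []]
    by_cases hc : pvStream raw = []
    · simp [hc, PySem.Set.add, PySem.Set.contains]
    · have hu := pvFoldAdd_ne_nil (pvStream raw) hc
      simp [hc, hu]
  cases cm with
  | none => exact core ["byok"]
  | some l =>
    by_cases hl : l.isEmpty
    · simpa [pvCanonModes, pvItemModes, pvStream, hl] using core ["byok"]
    · simpa [pvCanonModes, pvItemModes, pvStream, hl] using core l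

-- one B step is the abstraction of one add step
theorem pvStep_abs (d : List String) (m : String) :
    pvAltStep (pvAbs d) m = pvAbs (PySem.Set.add d m) := by
  by_cases h1 : m = "rhumb_managed"
  · subst h1
    by_cases hm : "rhumb_managed" ∈ d <;>
      simp [pvAltStep, pvAbs, PySem.Set.add, PySem.Set.contains, pvPrio,
        List.contains_iff_mem, hm, List.filter_append]
  · by_cases h2 : m = "agent_vault"
    · subst h2
      by_cases hm : "agent_vault" ∈ d <;>
        simp [pvAltStep, pvAbs, PySem.Set.add, PySem.Set.contains, pvPrio,
          List.contains_iff_mem, hm, List.filter_append, h1]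
    · by_cases h3 : m = "byok"
      · subst h3
        by_cases hm : "byok" ∈ d <;>
          simp [pvAltStep, pvAbs, PySem.Set.add, PySem.Set.contains, pvPrio,
            List.contains_iff_mem, hm, List.filter_append, h1, h2]
      · have hp : pvPrio m = false := by simp [pvPrio, h1, h2, h3]
        have e1 : ¬("rhumb_managed" = m) := fun h => h1 h.symm
        have e2 : ¬("agent_vault" = m) := fun h => h2 h.symm
        have e3 : ¬("byok" = m) := fun h => h3 h.symm
        by_cases hm : m ∈ d <;>
          simp [pvAltStep, pvAbs, PySem.Set.add, PySem.Set.contains, pvPrio,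
            List.contains_iff_mem, hm, List.filter_append, h1, h2, h3, List.mem_filter, hp,
            e1, e2, e3]

-- B's inner loop is the abstraction of the add-fold
theorem pvFoldB_abs (l : List String) (d : List String) :
    l.foldl pvAltStep (pvAbs d)
    = pvAbs (l.foldl PySem.Set.add d) := by
  induction l generalizing d with
  | nil => rfl
  | cons a l ih =>
    rw [List.foldl_cons, List.foldl_cons, pvStep_abs]
    exact ih (PySem.Set.add d a)

theorem pvNodup_foldAdd (l d : List String) (h : d.Nodup) :
    (l.foldl PySem.Set.add d).Nodup := by
  induction l generalizing d with
  | nil => exact h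
  | cons a l ih => exact ih (PySem.Set.add d a) (PySem.Set.nodup_add d a h)

-- A's extend loop over a nodup discovered list with a priority-filter seed
theorem pvExtend_fold (l init : List String) (hnd : l.Nodup)
    (h1 : ∀ m ∈ l, pvPrio m = true → m ∈ init)
    (h2 : ∀ m ∈ l, pvPrio m = false → m ∉ init) :
    l.foldl (fun om m => if om.contains m then om else om ++ [m]) init
      = init ++ l.filter (fun m => !pvPrio m) := by
  induction l generalizing init with
  | nil => simp
  | cons a l ih =>
    rw [List.foldl_cons]
    rcases List.nodup_cons.mp hnd with ⟨hal, hl⟩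
    by_cases hp : pvPrio a = true
    · have ha : a ∈ init := h1 a List.mem_cons_self hp
      rw [if_pos (List.contains_iff_mem.mpr ha)]
      rw [ih init hl (fun m hm => h1 m (List.mem_cons_of_mem _ hm))
          (fun m hm => h2 m (List.mem_cons_of_mem _ hm))]
      simp [List.filter_cons, hp]
    · have ha : a ∉ init := h2 a List.mem_cons_self (by simpa using hp)
      rw [if_neg (fun hc => ha (List.contains_iff_mem.mp hc))]
      rw [ih (init ++ [a]) hl
          (fun m hm hpm => List.mem_append.mpr (Or.inl (h1 m (List.mem_cons_of_mem _ hm) hpm)))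
          (fun m hm hpm => by
            intro hc
            rcases List.mem_append.mp hc with hc | hc
            · exact h2 m (List.mem_cons_of_mem _ hm) hpm hc
            · simp only [List.mem_singleton] at hc
              exact hal (hc ▸ hm))]
      simp [List.filter_cons, hp, List.append_assoc]

-- the common abstract discovery fold over all items
def pvBig (items : List (List (String × Option (List String)))) (d : List String) : List String :=
  items.foldl (fun d item =>
    (pvItemModes ((PySem.Dict.get? (PySem.Dict.mk item) "credential_modes").getD none)).foldl
      PySem.Set.add d) d

theorem pvOuterA (items : List (List (String × Option (List String)))) (d : List String) :
    items.foldl (fun (st : List String × PySem.Set String) item =>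
      (pvCanonModes ((PySem.Dict.get? (PySem.Dict.mk item) "credential_modes").getD none)).foldl
        pvDiscStep st) (d, d)
    = (pvBig items d, pvBig items d) := by
  induction items generalizing d with
  | nil => rfl
  | cons item items ih =>
    rw [List.foldl_cons]
    rw [pvDiscFold_diag, pvCanonModes_eq, pvFoldAdd_ofList]
    rw [ih]
    simp [pvBig]

theorem pvOuterB (items : List (List (String × Option (List String)))) (d : List String) :
    items.foldl (fun (st : (Bool × Bool × Bool) × List String) item =>
      (pvItemModes ((PySem.Dict.get? (PySem.Dict.mk item) "credential_modes").getD none)).foldl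
        pvAltStep st) (pvAbs d)
    = pvAbs (pvBig items d) := by
  induction items generalizing d with
  | nil => rfl
  | cons item items ih =>
    rw [List.foldl_cons, pvFoldB_abs, ih]
    simp [pvBig]

theorem pvBigNodup (items : List (List (String × Option (List String)))) (d : List String)
    (h : d.Nodup) : (pvBig items d).Nodup := by
  induction items generalizing d with
  | nil => exact h
  | cons item items ih =>
    exact ih _ (pvNodup_foldAdd _ d h)

theorem pvPrio_iff (m : String) :
    pvPrio m = true ↔ m = "rhumb_managed" ∨ m = "agent_vault" ∨ m = "byok" := by
  simp [pvPrio, or_assoc]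

-- ===== VERDICT (by name: the statement is the Claim_ definition above) =====
theorem recovery_supported_credential_modes_py_spec : Claim_equal_recovery_supported_credential_modes_py := by
  intro items _
  unfold Spec_recovery_supported_credential_modes_py
  unfold recovery_supported_credential_modes_py recovery_supported_credential_modes_py_alt
  rw [show (([], PySem.Set.empty) : List String × PySem.Set String) = ([], []) from rfl]
  rw [pvOuterA items []]
  rw [show (((false, false, false), []) : (Bool × Bool × Bool) × List String) = pvAbs [] from rfl]
  rw [pvOuterB items []]
  set D := pvBig items [] with hD
  have hnd : D.Nodup := pvBigNodup items [] List.nodup_nil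
  have hext := pvExtend_fold D
      ((["rhumb_managed", "agent_vault", "byok"] : List String).filter
        (fun m => PySem.Set.contains D m)) hnd
      (by
        intro m hm hp
        rcases (pvPrio_iff m).mp hp with h | h | h <;>
          · subst h
            simp [List.mem_filter, PySem.Set.contains, List.contains_iff_mem, hm])
      (by
        intro m hm hp hmem
        rw [List.mem_filter] at hmem
        rcases hmem with ⟨hmem, _⟩
        have hpt : pvPrio m = true := by
          rw [pvPrio_iff]
          simpa using hmem
        rw [hp] at hpt
        exact Bool.false_ne_true hpt)
  rw [hext]
  have habs : pvAbs D
      = ((D.contains "rhumb_managed", D.contains "agent_vault", D.contains "byok"),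
          D.filter (fun m => !pvPrio m)) := rfl
  rw [habs]
  by_cases hr : "rhumb_managed" ∈ D <;> by_cases ha : "agent_vault" ∈ D <;>
    by_cases hb : "byok" ∈ D <;>
      simp [List.filter_cons, PySem.Set.contains, List.contains_iff_mem, hr, ha, hb]
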